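-- pv_equiv track=rewrite | github.com/sebacaccaro/father_and_sons | Code/Modelling/anagram_hash_algorythm.py | buildLexicon
-- ===== SOURCE A (Python) =====
-- def badHash(word):
--     chars = list(set(word))
--     return sum([ord(char)**5 for char in chars])
--
-- def buildLexicon(dictionary):
--     lexicon = {}
--     for word in dictionary:
--         bh = badHash(word)
--         if bh in lexicon:
--             lexicon[bh].append(word)
--         else:
--             lexicon[bh] = [word]
--     return lexicon
-- ===== SOURCE B (Python) =====
-- def badHash(word):
--     chars = list(set(word))
--     return sum([ord(char)**5 for char in chars])
--
-- def buildLexicon(dictionary):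
--     hashes = [badHash(word) for word in dictionary]
--     keys = list(dict.fromkeys(hashes))
--     return {h: [w for w, hw in zip(dictionary, hashes) if hw == h] for h in keys}
-- ===== Notes on version B (the rewrite author's own statement) =====
-- stated objective: alternative
-- what changed: B replaces A's incremental dict-building loop (membership test + append-or-create per word) by a two-phase grouping: it precomputes every hash once, deduplicates the hash list to fix the key order, and then builds each bucket with one filtering pass per distinct key.
import Mathlib
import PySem

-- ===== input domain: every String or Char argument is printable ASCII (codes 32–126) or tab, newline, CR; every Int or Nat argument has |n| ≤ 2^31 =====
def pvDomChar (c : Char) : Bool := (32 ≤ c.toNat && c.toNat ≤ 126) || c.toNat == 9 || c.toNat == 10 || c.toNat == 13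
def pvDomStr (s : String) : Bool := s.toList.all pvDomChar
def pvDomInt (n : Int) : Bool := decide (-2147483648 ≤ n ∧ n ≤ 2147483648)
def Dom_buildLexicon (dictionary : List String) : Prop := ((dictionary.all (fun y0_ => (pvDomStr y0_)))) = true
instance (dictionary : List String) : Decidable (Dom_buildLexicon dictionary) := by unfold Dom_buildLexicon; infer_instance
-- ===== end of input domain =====

-- B changes the decomposition (precomputed hashes + dedup + per-key filter instead of
-- incremental dict building); same cost class, not claimed faster.

-- ===== PORT A =====
-- badHash: sum over list(set(word)) of ord(char)**5 (sum is order-independent, so Set order is safe)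
def badHash (word : String) : Int :=
  ((PySem.Set.ofList word.toList).map (fun c => ((c.toNat : Int)) ^ 5)).sum

def buildLexicon (dictionary : List String) : List (Int × List String) :=
  (dictionary.foldl
    (fun lexicon word =>
      let bh := badHash word
      if lexicon.contains bh then lexicon.modify bh [] (· ++ [word])
      else lexicon.insert bh [word])
    PySem.Dict.empty).items

-- ===== PORT B =====
def buildLexicon_alt (dictionary : List String) : List (Int × List String) :=
  let hashes := dictionary.map badHash
  let keys := PySem.List.dedup hashes
  keys.map (fun h => (h, ((dictionary.zip hashes).filter (fun p => p.2 == h)).map (·.1)))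

-- ===== PRECONDITION & SPEC =====
def Spec_buildLexicon (dictionary : List String) (out : List (Int × List String)) : Prop := out = buildLexicon_alt dictionary
instance (dictionary : List String) (out : List (Int × List String)) : Decidable (Spec_buildLexicon dictionary out) := by unfold Spec_buildLexicon; infer_instance

-- ===== CLAIM (what is proved, stated in full; the proofs are below) =====
def Claim_equal_buildLexicon : Prop := ∀ (dictionary : List String), Dom_buildLexicon dictionary → Spec_buildLexicon dictionary (buildLexicon dictionary)

-- ===== LEMMAS AND PROOFS =====

-- the loop body of A, named for the induction lemmas
def aStep (lexicon : PySem.Dict Int (List String)) (word : String) : PySem.Dict Int (List String) :=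
  let bh := badHash word
  if lexicon.contains bh then lexicon.modify bh [] (· ++ [word])
  else lexicon.insert bh [word]

theorem aStep_keys (d : PySem.Dict Int (List String)) (w : String) :
    (aStep d w).keys = PySem.Set.add d.keys (badHash w) := by
  unfold aStep
  by_cases h : d.contains (badHash w) = true
  · simp [h, PySem.Dict.keys_modify, PySem.Dict.keys_insert_of_contains d _ h,
      PySem.Set.add, PySem.Set.contains, ← PySem.Dict.contains_iff_mem_keys]
  · simp only [Bool.not_eq_true] at h
    simp [h, PySem.Dict.keys_insert_of_not_contains d _ h, PySem.Set.add,
      PySem.Set.contains, ← PySem.Dict.contains_iff_mem_keys]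

theorem aFold_keys (ws : List String) (d : PySem.Dict Int (List String)) :
    (ws.foldl aStep d).keys = PySem.Set.update d.keys (ws.map badHash) := by
  induction ws generalizing d with
  | nil => simp [PySem.Set.update]
  | cons w ws ih =>
      simp only [List.foldl_cons, List.map_cons, ih, aStep_keys]
      rfl

theorem aStep_getD (d : PySem.Dict Int (List String)) (w : String) (c : Int) :
    (aStep d w).getD c [] = d.getD c [] ++ (if badHash w == c then [w] else []) := by
  unfold aStep
  by_cases h : d.contains (badHash w) = true
  · by_cases hc : c = badHash w
    · subst hc; simp [h, PySem.Dict.getD_modify_self]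
    · simp [h, PySem.Dict.getD_modify_of_ne d _ _ hc,
        (by simpa using (Ne.symm hc) : ¬ badHash w = c)]
  · simp only [Bool.not_eq_true] at h
    by_cases hc : c = badHash w
    · subst hc
      simp [h, PySem.Dict.getD_insert_self, PySem.Dict.getD_of_not_contains d _ h]
    · simp [h, PySem.Dict.getD_insert_of_ne d _ _ hc,
        (by simpa using (Ne.symm hc) : ¬ badHash w = c)]

theorem aFold_getD (ws : List String) (d : PySem.Dict Int (List String)) (c : Int) :
    (ws.foldl aStep d).getD c [] = d.getD c [] ++ (ws.filter (fun w => badHash w == c)) := by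
  induction ws generalizing d with
  | nil => simp
  | cons w ws ih =>
      simp only [List.foldl_cons, ih, aStep_getD]
      by_cases h : badHash w = c <;> simp [h]

theorem aFold_nodup_keys (ws : List String) (d : PySem.Dict Int (List String))
    (h : d.keys.Nodup) : (ws.foldl aStep d).keys.Nodup := by
  induction ws generalizing d with
  | nil => exact h
  | cons w ws ih =>
      refine ih _ ?_
      rw [aStep_keys]
      exact PySem.Set.nodup_add _ _ h

theorem zip_map_self (ws : List String) :
    ws.zip (ws.map badHash) = ws.map (fun w => (w, badHash w)) := by
  induction ws with
  | nil => rfl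
  | cons w ws ih => simp [ih]

theorem bucket_eq (ws : List String) (h : Int) :
    ((ws.zip (ws.map badHash)).filter (fun p => p.2 == h)).map (·.1)
      = ws.filter (fun w => badHash w == h) := by
  rw [zip_map_self]
  induction ws with
  | nil => rfl
  | cons w ws ih =>
      by_cases hb : badHash w == h <;> simp [hb, ih]

-- ===== VERDICT (by name: the statement is the Claim_ definition above) =====
theorem buildLexicon_spec : Claim_equal_buildLexicon := by
  intro dictionary _
  unfold Spec_buildLexicon buildLexicon buildLexicon_alt
  show (dictionary.foldl aStep PySem.Dict.empty).items = _
  rw [PySem.Dict.items_eq_map_keys _ (aFold_nodup_keys _ _ (by simp)) []]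
  rw [aFold_keys]
  simp only [PySem.Dict.keys_empty, PySem.Set.update_nil_left, PySem.List.dedup_eq_ofList]
  refine List.map_congr_left (fun h hmem => ?_)
  rw [aFold_getD, bucket_eq]
  simp
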